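-- pv_equiv track=rewrite | github.com/brockwebb/arnold | scripts/hrr_plateau_detection.py | deduplicate_detections
-- ===== SOURCE A (Python) =====
-- from typing import List, Tuple, Optional, Set
--
-- def deduplicate_detections(
--     peak_indices: List[int],
--     plateau_indices: List[int],
--     dedup_window_sec: int = 30
-- ) -> List[Tuple[int, str]]:
--     """
--     Merge peak-detected and plateau-detected indices, removing duplicates.
--
--     Returns list of (index, source) where source is 'peak' or 'plateau'.
--     Peak detections take priority when there's overlap.
--     """
--     # Mark all with source
--     all_detections = [(idx, 'peak') for idx in peak_indices]
--
--     for plateau_idx in plateau_indices: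
--         # Check if this overlaps with any peak detection
--         is_duplicate = False
--         for peak_idx in peak_indices:
--             if abs(plateau_idx - peak_idx) <= dedup_window_sec:
--                 is_duplicate = True
--                 break
--
--         if not is_duplicate:
--             all_detections.append((plateau_idx, 'plateau'))
--
--     # Sort by index
--     all_detections.sort(key=lambda x: x[0])
--
--     return all_detections
-- ===== SOURCE B (Python) =====
-- def deduplicate_detections(peak_indices, plateau_indices, dedup_window_sec=30):
--     sorted_peaks = sorted(peak_indices)
--     n = len(sorted_peaks)
--
--     def near_peak(q):
--         # binary search: first index with sorted_peaks[i] >= q - dedup_window_sec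
--         lo, hi = 0, n
--         while lo < hi:
--             mid = (lo + hi) // 2
--             if sorted_peaks[mid] < q - dedup_window_sec:
--                 lo = mid + 1
--             else:
--                 hi = mid
--         return lo < n and sorted_peaks[lo] <= q + dedup_window_sec
--
--     merged = [(p, 'peak') for p in peak_indices]
--     merged.extend((q, 'plateau') for q in plateau_indices if not near_peak(q))
--     merged.sort(key=lambda t: t[0])
--     return merged
-- ===== Notes on version B (the rewrite author's own statement) =====
-- stated objective: faster
-- what changed: B sorts the peaks once and decides each plateau's window-overlap by a hand-written binary search on that sorted list (building survivors with a filter), instead of A's linear scan over all peaks for every plateau.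
import Mathlib
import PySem

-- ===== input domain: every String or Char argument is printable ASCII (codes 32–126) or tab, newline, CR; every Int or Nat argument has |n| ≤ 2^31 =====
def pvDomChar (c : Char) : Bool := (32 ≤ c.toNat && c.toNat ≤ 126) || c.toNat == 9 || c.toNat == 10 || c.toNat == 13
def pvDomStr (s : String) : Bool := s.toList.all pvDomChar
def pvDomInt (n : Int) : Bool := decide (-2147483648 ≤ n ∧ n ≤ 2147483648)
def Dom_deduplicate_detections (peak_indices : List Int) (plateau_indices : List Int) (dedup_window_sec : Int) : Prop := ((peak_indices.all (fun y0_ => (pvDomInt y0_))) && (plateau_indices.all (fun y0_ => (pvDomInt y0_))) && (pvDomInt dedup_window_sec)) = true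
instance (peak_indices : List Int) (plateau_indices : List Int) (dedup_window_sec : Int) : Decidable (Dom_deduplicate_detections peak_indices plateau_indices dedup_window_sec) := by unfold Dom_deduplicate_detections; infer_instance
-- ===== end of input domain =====

-- B replaces A's inner linear scan over all peaks by one upfront sort of the peaks and a
-- binary search per plateau: O((P+Q)·log P + N log N) instead of O(P·Q + N log N).

-- ===== PORT A =====
-- A's inner `for peak_idx … if abs(...) <= w: is_duplicate = True; break` loop.
def dedupIsDup (peak_indices : List Int) (plateau_idx : Int) (dedup_window_sec : Int) : Bool :=
  match peak_indices with
  | [] => false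
  | peak_idx :: rest =>
      if |plateau_idx - peak_idx| ≤ dedup_window_sec then true
      else dedupIsDup rest plateau_idx dedup_window_sec

def deduplicate_detections (peak_indices : List Int) (plateau_indices : List Int) (dedup_window_sec : Int) : List (Int × String) :=
  let all_detections := peak_indices.map (fun idx => (idx, "peak"))
  let all_detections := plateau_indices.foldl
    (fun acc plateau_idx =>
      if dedupIsDup peak_indices plateau_idx dedup_window_sec then acc
      else acc ++ [(plateau_idx, "plateau")]) all_detections
  PySem.List.sorted all_detections (fun x => x.1) false

-- ===== PORT B =====
-- Source B's hand-written binary-search loop (`while lo < hi: …`), ported literally.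
def dedupBSearch (sp : List Int) (target : Int) (lo hi : Nat) : Nat :=
  if h : lo < hi then
    let mid := (lo + hi) / 2
    if sp.getD mid 0 < target then dedupBSearch sp target (mid + 1) hi
    else dedupBSearch sp target lo mid
  else lo
termination_by hi - lo
decreasing_by all_goals omega

def dedupNearPeak (sp : List Int) (q : Int) (dedup_window_sec : Int) : Bool :=
  let lo := dedupBSearch sp (q - dedup_window_sec) 0 sp.length
  decide (lo < sp.length) && decide (sp.getD lo 0 ≤ q + dedup_window_sec)

def deduplicate_detections_alt (peak_indices : List Int) (plateau_indices : List Int) (dedup_window_sec : Int) : List (Int × String) :=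
  let sorted_peaks := PySem.List.sorted peak_indices (fun x => x) false
  let merged := peak_indices.map (fun p => (p, "peak"))
  let merged := merged ++
    (plateau_indices.filter (fun q => !dedupNearPeak sorted_peaks q dedup_window_sec)).map
      (fun q => (q, "plateau"))
  PySem.List.sorted merged (fun t => t.1) false

-- ===== PRECONDITION & SPEC =====
def Spec_deduplicate_detections (peak_indices : List Int) (plateau_indices : List Int) (dedup_window_sec : Int) (out : List (Int × String)) : Prop := out = deduplicate_detections_alt peak_indices plateau_indices dedup_window_sec
instance (peak_indices : List Int) (plateau_indices : List Int) (dedup_window_sec : Int) (out : List (Int × String)) : Decidable (Spec_deduplicate_detections peak_indices plateau_indices dedup_window_sec out) := by unfold Spec_deduplicate_detections; infer_instance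

-- ===== CLAIM (what is proved, stated in full; the proofs are below) =====
def Claim_equal_deduplicate_detections : Prop := ∀ (peak_indices : List Int) (plateau_indices : List Int) (dedup_window_sec : Int), Dom_deduplicate_detections peak_indices plateau_indices dedup_window_sec → Spec_deduplicate_detections peak_indices plateau_indices dedup_window_sec (deduplicate_detections peak_indices plateau_indices dedup_window_sec)

-- ===== LEMMAS AND PROOFS =====

-- A's scan is the existence of a peak within the window.
theorem dedupIsDup_iff (peaks : List Int) (q w : Int) :
    dedupIsDup peaks q w = true ↔ ∃ p ∈ peaks, q - w ≤ p ∧ p ≤ q + w := by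
  induction peaks with
  | nil => simp [dedupIsDup]
  | cons a t ih =>
      simp only [dedupIsDup]
      split_ifs with h
      · rw [abs_le] at h
        simp only [true_iff]
        exact ⟨a, List.mem_cons_self, by omega⟩
      · rw [abs_le] at h
        simp only [ih, List.mem_cons]
        constructor
        · rintro ⟨p, hp, hb⟩; exact ⟨p, Or.inr hp, hb⟩
        · rintro ⟨p, hp | hp, hb⟩
          · omega
          · exact ⟨p, hp, hb⟩

-- Binary-search invariant (no sortedness needed): the result r lies in [lo, hi],
-- sp[r-1] < t when lo < r, and t ≤ sp[r] when r < hi.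
theorem dedupBSearch_spec (sp : List Int) (t : Int) :
    ∀ n lo hi, hi - lo = n → lo ≤ hi →
    lo ≤ dedupBSearch sp t lo hi ∧ dedupBSearch sp t lo hi ≤ hi ∧
    (dedupBSearch sp t lo hi < hi → t ≤ sp.getD (dedupBSearch sp t lo hi) 0) ∧
    (lo < dedupBSearch sp t lo hi → sp.getD (dedupBSearch sp t lo hi - 1) 0 < t) := by
  intro n
  induction n using Nat.strong_induction_on with
  | _ n ih =>
    intro lo hi hn hlh
    rw [dedupBSearch]
    by_cases h : lo < hi
    · rw [dif_pos h]
      simp only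
      by_cases hcmp : sp.getD ((lo + hi) / 2) 0 < t
      · rw [if_pos hcmp]
        have hm : (lo + hi) / 2 < hi ∧ lo ≤ (lo + hi) / 2 := by omega
        obtain ⟨h1, h2, h3, h4⟩ := ih (hi - ((lo + hi) / 2 + 1)) (by omega) _ hi rfl (by omega)
        refine ⟨by omega, h2, h3, fun _ => ?_⟩
        by_cases hc : (lo + hi) / 2 + 1 < dedupBSearch sp t ((lo + hi) / 2 + 1) hi
        · exact h4 hc
        · have he : dedupBSearch sp t ((lo + hi) / 2 + 1) hi = (lo + hi) / 2 + 1 := by omega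
          rw [he]; simpa using hcmp
      · rw [if_neg hcmp]
        have hm : (lo + hi) / 2 < hi ∧ lo ≤ (lo + hi) / 2 := by omega
        obtain ⟨h1, h2, h3, h4⟩ := ih ((lo + hi) / 2 - lo) (by omega) lo _ rfl (by omega)
        refine ⟨h1, by omega, fun _ => ?_, h4⟩
        by_cases hc : dedupBSearch sp t lo ((lo + hi) / 2) < (lo + hi) / 2
        · exact h3 hc
        · have he : dedupBSearch sp t lo ((lo + hi) / 2) = (lo + hi) / 2 := by omega
          rw [he]; omega
    · rw [dif_neg h]
      refine ⟨le_refl _, by omega, by omega, by omega⟩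

-- On a sorted list, B's binary-search test decides the window-membership question.
theorem nearPeak_iff (sp : List Int) (hpair : sp.Pairwise (· ≤ ·)) (q w : Int) :
    dedupNearPeak sp q w = true ↔ ∃ p ∈ sp, q - w ≤ p ∧ p ≤ q + w := by
  have hmono : ∀ i j, (hij : i ≤ j) → (hj : j < sp.length) →
      sp[i]'(Nat.lt_of_le_of_lt hij hj) ≤ sp[j] := by
    intro i j hij hj
    rcases Nat.lt_or_eq_of_le hij with hlt | rfl
    · exact (List.pairwise_iff_getElem.mp hpair) i j (Nat.lt_of_le_of_lt hij hj) hj hlt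
    · exact le_refl _
  obtain ⟨-, h2, h3, h4⟩ := dedupBSearch_spec sp (q - w) (sp.length - 0) 0 sp.length rfl (Nat.zero_le _)
  set r := dedupBSearch sp (q - w) 0 sp.length with hr
  simp only [dedupNearPeak, ← hr, Bool.and_eq_true, decide_eq_true_eq]
  constructor
  · rintro ⟨hlt, hle⟩
    have hg : sp.getD r 0 = sp[r]'hlt := List.getD_eq_getElem sp 0 hlt
    exact ⟨sp[r]'hlt, List.getElem_mem hlt, by have := h3 hlt; rw [hg] at this hle; omega⟩
  · rintro ⟨p, hp, hb⟩
    obtain ⟨j, hj, hpj⟩ := List.getElem_of_mem hp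
    have hrj : r ≤ j := by
      by_contra hcon
      push Not at hcon
      have hlt0 : 0 < r := by omega
      have h5 := h4 hlt0
      rw [List.getD_eq_getElem sp 0 (show r - 1 < sp.length by omega)] at h5
      have hm := hmono j (r - 1) (by omega) (by omega)
      rw [hpj] at hm
      omega
    have hrlt : r < sp.length := by omega
    refine ⟨hrlt, ?_⟩
    have hm := hmono r j hrj hj
    rw [hpj] at hm
    rw [List.getD_eq_getElem sp 0 hrlt]
    omega

-- B's binary-search test agrees with A's linear scan.
theorem nearPeak_eq_isDup (peaks : List Int) (q w : Int) :
    dedupNearPeak (PySem.List.sorted peaks (fun x => x) false) q w = dedupIsDup peaks q w := by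
  rw [Bool.eq_iff_iff, dedupIsDup_iff]
  rw [nearPeak_iff _ (by simpa using PySem.List.sorted_pairwise peaks (fun x => x)) q w]
  constructor
  · rintro ⟨p, hp, hb⟩
    exact ⟨p, (PySem.List.mem_sorted peaks (fun x => x) false p).mp hp, hb⟩
  · rintro ⟨p, hp, hb⟩
    exact ⟨p, (PySem.List.mem_sorted peaks (fun x => x) false p).mpr hp, hb⟩

-- ===== VERDICT (by name: the statement is the Claim_ definition above) =====
theorem deduplicate_detections_spec : Claim_equal_deduplicate_detections := by
  intro peaks plateaus w _
  show _ = _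
  simp only [deduplicate_detections, deduplicate_detections_alt]
  rw [← PySem.List.foldl_append_if
    (fun q => !dedupNearPeak (PySem.List.sorted peaks (fun x => x) false) q w)
    (fun q => (q, "plateau")) plateaus (peaks.map (fun idx => (idx, "peak")))]
  congr 1
  congr 1
  funext acc q
  rw [nearPeak_eq_isDup peaks q w]
  by_cases h : dedupIsDup peaks q w <;> simp [h]
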